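-- pv_equiv track=rewrite | github.com/a-brandon/practice | edabit/distance_to_nearest_vowel.py | distance_to_nearest_vowel
-- ===== SOURCE A (Python) =====
-- def distance_to_nearest_vowel(txt):
--     if len(set(txt)) == 1:
--         return [0] * len(txt)
--
--     dist = []
--     for i, c in enumerate(txt):
--         if c in 'aeiou':
--             dist.append(0)
--         else:
--             vowels = [i for i, v in enumerate(txt) if v in 'aeiou']
--             min_dist = min(abs(i - x) for x in vowels)
--             dist.append(min_dist)
--
--     return dist
-- ===== SOURCE B (Python) =====
-- VOWELS = frozenset('aeiou')
--
--
-- def distance_to_nearest_vowel(txt):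
--     n = len(txt)
--     if n and all(c not in VOWELS for c in txt):
--         raise ValueError('txt contains no vowel')
--     res = []
--     last = None                      # index of nearest vowel to the left (inclusive)
--     for i, c in enumerate(txt):
--         if c in VOWELS:
--             last = i
--         res.append(n if last is None else i - last)
--     nxt = None                       # index of nearest vowel to the right (inclusive)
--     for i in range(n - 1, -1, -1):
--         if txt[i] in VOWELS:
--             nxt = i
--         if nxt is not None and nxt - i < res[i]:
--             res[i] = nxt - i
--     return res
-- ===== Notes on version B (the rewrite author's own statement) =====
-- stated objective: faster
-- what changed: Replaced the per-character rebuild of the vowel-index list and min-scan (quadratic) by a linear two-pass sweep that tracks the nearest vowel index to the left and then to the right; B raises ValueError on nonempty vowel-free input, where A either raises too or (all characters equal) returns an accidental [0]*n from its len(set)==1 shortcut.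
-- outside the precondition, e.g. on distance_to_nearest_vowel('bbb'): A returns [0, 0, 0], B raises ValueError; on distance_to_nearest_vowel('b'): A returns [0], B raises ValueError
import Mathlib
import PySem

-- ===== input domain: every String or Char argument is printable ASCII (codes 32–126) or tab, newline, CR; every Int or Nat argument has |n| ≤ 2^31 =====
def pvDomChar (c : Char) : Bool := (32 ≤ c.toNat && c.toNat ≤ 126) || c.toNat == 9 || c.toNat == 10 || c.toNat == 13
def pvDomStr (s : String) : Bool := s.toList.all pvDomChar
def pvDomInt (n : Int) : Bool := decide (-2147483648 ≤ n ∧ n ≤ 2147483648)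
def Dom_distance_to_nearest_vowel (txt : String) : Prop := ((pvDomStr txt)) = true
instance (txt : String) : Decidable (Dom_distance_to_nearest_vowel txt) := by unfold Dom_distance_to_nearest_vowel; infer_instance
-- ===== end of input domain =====

-- B replaces A's per-character rebuild of the vowel-index list and min-scan by a linear
-- two-pass sweep tracking the nearest vowel index to the left and then to the right.

-- shared constant: the string 'aeiou' as a character list
def pvVowels : List Char := ['a', 'e', 'i', 'o', 'u']

-- ===== PORT A =====
def distance_to_nearest_vowel (txt : String) : List Int :=
  let cs := txt.toList
  if PySem.Set.len (PySem.Set.ofList cs) = 1 then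
    List.replicate cs.length (0 : Int)
  else
    (PySem.List.enumerate cs).foldl
      (fun dist ic =>
        if pvVowels.contains ic.2 then
          dist ++ [(0 : Int)]
        else
          let vowels :=
            ((PySem.List.enumerate cs).filter (fun p => pvVowels.contains p.2)).map (·.1)
          -- Python's min(...) raises ValueError when 'vowels' is empty: those inputs are outside Pre_
          let min_dist := (PySem.List.min? (vowels.map (fun x => |ic.1 - x|)) (fun y => y)).getD 0
          dist ++ [min_dist])
      []

-- ===== PORT B =====
def distance_to_nearest_vowel_alt (txt : String) : List Int :=
  let cs := txt.toList
  let n := cs.length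
  if cs.length != 0 && cs.all (fun c => !(pvVowels.contains c)) then
    []  -- the Python raises ValueError here; those inputs are outside Pre_
  else
    -- left-to-right pass: res[i] = i - (last vowel index ≤ i), sentinel n while none seen
    let left := (PySem.List.enumerate cs).foldl
      (fun (st : List Int × Option Int) ic =>
        let last := if pvVowels.contains ic.2 then some ic.1 else st.2
        (st.1 ++ [match last with | none => (n : Int) | some l => ic.1 - l], last))
      ([], none)
    -- right-to-left pass over the same positions, improving res[i] with (next vowel ≥ i) - i
    let right := ((PySem.List.enumerate cs).zip left.1).foldr
      (fun p (st : Option Int × List Int) =>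
        let nxt := if pvVowels.contains p.1.2 then some p.1.1 else st.1
        let v := match nxt with
          | none => p.2
          | some j => if j - p.1.1 < p.2 then j - p.1.1 else p.2
        (nxt, v :: st.2))
      (none, [])
    right.2

-- ===== PRECONDITION & SPEC =====
-- Pre_ excludes nonempty vowel-free strings: A raises ValueError on them (min over an empty
-- list) unless all characters are equal, where its len(set)==1 shortcut returns an accidental
-- [0]*n; B raises ValueError on all of them.
def Pre_distance_to_nearest_vowel (txt : String) : Prop :=
  txt.toList = [] ∨ txt.toList.any (fun c => pvVowels.contains c) = true
instance (txt : String) : Decidable (Pre_distance_to_nearest_vowel txt) := by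
  unfold Pre_distance_to_nearest_vowel; infer_instance

def pvWitness_distance_to_nearest_vowel : String := "shopper"

def Spec_distance_to_nearest_vowel (txt : String) (out : List Int) : Prop :=
  out = distance_to_nearest_vowel_alt txt
instance (txt : String) (out : List Int) : Decidable (Spec_distance_to_nearest_vowel txt out) := by
  unfold Spec_distance_to_nearest_vowel; infer_instance

-- ===== CLAIM (what is proved, stated in full; the proofs are below) =====
def Claim_equal_distance_to_nearest_vowel : Prop :=
  ∀ (txt : String), Dom_distance_to_nearest_vowel txt →
    Pre_distance_to_nearest_vowel txt →
      Spec_distance_to_nearest_vowel txt (distance_to_nearest_vowel txt)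

-- ===== LEMMAS AND PROOFS =====

def vIdxS (s : Int) (cs : List Char) : List Int :=
  ((PySem.List.enumerate cs s).filter (fun p => pvVowels.contains p.2)).map (·.1)
theorem vIdxS_cons (s : Int) (c : Char) (cs : List Char) :
    vIdxS s (c :: cs) = (if pvVowels.contains c then [s] else []) ++ vIdxS (s + 1) cs := by
  simp [vIdxS, PySem.List.enumerate_cons]
  split_ifs with h <;> simp [h]
def lastF (cs : List Char) (s : Int) (l0 : Option Int) : Option Int :=
  match cs with
  | [] => l0
  | c :: cs => lastF cs (s + 1) (if pvVowels.contains c then some s else l0)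
def firstF (cs : List Char) (s : Int) : Option Int :=
  match cs with
  | [] => none
  | c :: cs => if pvVowels.contains c then some s else firstF cs (s + 1)

theorem lastF_eq (cs : List Char) : ∀ (s : Int) (l0 : Option Int),
    lastF cs s l0 = (vIdxS s cs).getLast?.or l0 := by
  induction cs with
  | nil => intro s l0; simp [lastF, vIdxS]
  | cons c cs ih =>
    intro s l0
    rw [lastF, ih, vIdxS_cons]
    split_ifs with h
    · rw [List.getLast?_append]
      cases (vIdxS (s + 1) cs).getLast? <;> simp
    · simp

theorem lastF_append (l1 l2 : List Char) : ∀ (s : Int) (l0 : Option Int),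
    lastF (l1 ++ l2) s l0 = lastF l2 (s + l1.length) (lastF l1 s l0) := by
  induction l1 with
  | nil => intro s l0; simp [lastF]
  | cons c l1 ih =>
    intro s l0
    simp only [List.cons_append, lastF, ih, List.length_cons]
    congr 1
    push_cast; ring

theorem firstF_eq (cs : List Char) : ∀ (s : Int),
    firstF cs s = (vIdxS s cs).head? := by
  induction cs with
  | nil => intro s; simp [firstF, vIdxS]
  | cons c cs ih =>
    intro s
    rw [firstF, vIdxS_cons]
    split_ifs with h <;> simp [ih]

-- max/min via pairwise
theorem getLast?_max {l : List Int} (hp : l.Pairwise (· < ·)) :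
    ∀ x ∈ l, ∃ m, l.getLast? = some m ∧ x ≤ m := by
  induction l with
  | nil => simp
  | cons a t ih =>
    intro x hx
    cases t with
    | nil =>
      simp at hx
      exact ⟨a, rfl, le_of_eq hx⟩
    | cons b t' =>
      obtain ⟨m, hm, hbm⟩ := ih hp.tail b List.mem_cons_self
      refine ⟨m, by rw [List.getLast?_cons_cons]; exact hm, ?_⟩
      rcases List.mem_cons.1 hx with rfl | hxt
      · exact le_of_lt (lt_of_lt_of_le (List.rel_of_pairwise_cons hp List.mem_cons_self) hbm)
      · obtain ⟨m', hm', hxm'⟩ := ih hp.tail x hxt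
        rw [hm'] at hm
        exact le_trans hxm' (by injection hm with h; omega)

theorem head?_min {l : List Int} (hp : l.Pairwise (· < ·)) {x : Int} (hx : x ∈ l) :
    ∃ m, l.head? = some m ∧ m ≤ x := by
  cases l with
  | nil => simp at hx
  | cons a t =>
    refine ⟨a, rfl, ?_⟩
    rcases List.mem_cons.1 hx with rfl | hxt
    · exact le_refl x
    · exact le_of_lt (List.rel_of_pairwise_cons hp hxt)
def dminD (n : Nat) (vs : List Int) (i : Int) : Int :=
  (PySem.List.min? (vs.map (fun x => |i - x|)) (fun y => y)).getD n

theorem min?_of_ne_nil {l : List Int} (h : l ≠ []) :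
    ∃ m, PySem.List.min? l (fun y => y) = some m := by
  cases hm : PySem.List.min? l (fun y => y) with
  | none => exact absurd ((PySem.List.min?_eq_none_iff l _).1 hm) h
  | some m => exact ⟨m, rfl⟩

theorem dminD_eq_of {n : Nat} {vs : List Int} {i v : Int}
    (hmem : v ∈ vs.map (fun x => |i - x|))
    (hlb : ∀ x ∈ vs, v ≤ |i - x|) : dminD n vs i = v := by
  have hne : vs.map (fun x => |i - x|) ≠ [] := by
    intro h; rw [h] at hmem; simp at hmem
  obtain ⟨m, hm⟩ := min?_of_ne_nil hne
  have h1 : m ≤ v := PySem.List.min?_isMin hm v hmem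
  have h2 : v ≤ m := by
    obtain ⟨x, hx, rfl⟩ := List.mem_map.1 (PySem.List.min?_mem hm)
    exact hlb x hx
  simp [dminD, hm]; omega

theorem dminD_eq_zero {n : Nat} {vs : List Int} {i : Int} (h : i ∈ vs) : dminD n vs i = 0 := by
  refine dminD_eq_of (List.mem_map.2 ⟨i, h, by simp⟩) ?_
  intro x hx; exact abs_nonneg _

def leftvF (n : Nat) (i : Int) (prev : Option Int) : Int :=
  match prev with | none => (n : Int) | some l => i - l

def combvF (n : Nat) (i : Int) (prev next : Option Int) : Int :=
  match next with
  | none => leftvF n i prev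
  | some j => if j - i < leftvF n i prev then j - i else leftvF n i prev

theorem core (i : Int) (n : Nat) (vs : List Int) (prev next : Option Int)
    (hi0 : 0 ≤ i)
    (hvs : vs ≠ [])
    (hprev_mem : ∀ l, prev = some l → l ∈ vs ∧ l ≤ i)
    (hprev_max : ∀ x ∈ vs, x ≤ i → ∃ l, prev = some l ∧ x ≤ l)
    (hnext_mem : ∀ j, next = some j → j ∈ vs ∧ i ≤ j ∧ j < n)
    (hnext_min : ∀ x ∈ vs, i ≤ x → ∃ j, next = some j ∧ j ≤ x) :
    combvF n i prev next = dminD n vs i := by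
  cases prev with
  | none =>
    -- no vowel at or left of i: every x ∈ vs has i < x, so next = some j with j minimal
    have hall : ∀ x ∈ vs, i < x := by
      intro x hx
      by_contra hcon
      obtain ⟨l, hl, _⟩ := hprev_max x hx (by omega)
      simp at hl
    obtain ⟨x0, hx0⟩ := List.exists_mem_of_ne_nil vs hvs
    obtain ⟨j, hj, _⟩ := hnext_min x0 hx0 (le_of_lt (hall x0 hx0))
    subst hj
    obtain ⟨hjvs, hij, hjn⟩ := hnext_mem j rfl
    have hcond : j - i < (n : Int) := by omega
    simp only [combvF, leftvF, hcond, if_pos]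
    refine (dminD_eq_of (List.mem_map.2 ⟨j, hjvs, by rw [abs_of_nonpos (by omega)]; ring⟩) ?_).symm
    intro x hx
    obtain ⟨j', hj', hj'x⟩ := hnext_min x hx (le_of_lt (hall x hx))
    injection hj' with hjj
    rw [abs_of_nonpos (by have := hall x hx; omega)]
    omega
  | some l =>
    obtain ⟨hlvs, hli⟩ := hprev_mem l rfl
    have hprev_max' : ∀ x ∈ vs, x ≤ i → x ≤ l := by
      intro x hx hxi
      obtain ⟨l', hl', hxl'⟩ := hprev_max x hx hxi
      injection hl' with h; omega
    cases next with
    | none =>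
      have hallle : ∀ x ∈ vs, x ≤ i := by
        intro x hx
        by_contra hcon
        obtain ⟨j, hj, _⟩ := hnext_min x hx (by omega)
        simp at hj
      simp only [combvF, leftvF]
      refine (dminD_eq_of (List.mem_map.2 ⟨l, hlvs, by rw [abs_of_nonneg (by omega)]⟩) ?_).symm
      intro x hx
      rw [abs_of_nonneg (by have := hallle x hx; omega)]
      have := hprev_max' x hx (hallle x hx)
      omega
    | some j =>
      obtain ⟨hjvs, hij, hjn⟩ := hnext_mem j rfl
      have hnext_min' : ∀ x ∈ vs, i ≤ x → j ≤ x := by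
        intro x hx hix
        obtain ⟨j', hj', hxj'⟩ := hnext_min x hx hix
        injection hj' with h; omega
      have hlbgen : ∀ x ∈ vs,
          (if j - i < i - l then j - i else i - l) ≤ |i - x| := by
        intro x hx
        rcases le_or_gt x i with hxi | hxi
        · rw [abs_of_nonneg (by omega)]
          have := hprev_max' x hx hxi
          split_ifs <;> omega
        · rw [abs_of_nonpos (by omega)]
          have := hnext_min' x hx (by omega)
          split_ifs <;> omega
      simp only [combvF, leftvF]
      split_ifs with hcond
      · exact (dminD_eq_of (List.mem_map.2 ⟨j, hjvs, by rw [abs_of_nonpos (by omega)]; ring⟩)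
          (by intro x hx; have := hlbgen x hx; rw [if_pos hcond] at this; exact this)).symm
      · exact (dminD_eq_of (List.mem_map.2 ⟨l, hlvs, by rw [abs_of_nonneg (by omega)]⟩)
          (by intro x hx; have := hlbgen x hx; rw [if_neg hcond] at this; exact this)).symm

def Lf (n : Nat) (cs : List Char) (s : Int) (l0 : Option Int) : List Int :=
  match cs with
  | [] => []
  | c :: cs =>
    let l1 := if pvVowels.contains c then some s else l0
    (match l1 with | none => (n : Int) | some l => s - l) :: Lf n cs (s + 1) l1

def combineF (cs : List Char) (s : Int) (rs : List Int) : List Int :=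
  match cs, rs with
  | c :: cs, r :: rs =>
    (match firstF (c :: cs) s with
     | none => r
     | some j => if j - s < r then j - s else r) :: combineF cs (s + 1) rs
  | _, _ => []

theorem leftFold (n : Nat) (cs : List Char) :
    ∀ (s : Int) (acc : List Int) (l0 : Option Int),
    (PySem.List.enumerate cs s).foldl
      (fun (st : List Int × Option Int) ic =>
        let last := if pvVowels.contains ic.2 then some ic.1 else st.2
        (st.1 ++ [match last with | none => (n : Int) | some l => ic.1 - l], last))
      (acc, l0)
    = (acc ++ Lf n cs s l0, lastF cs s l0) := by
  induction cs with
  | nil => intro s acc l0; simp [Lf, lastF]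
  | cons c cs ih =>
    intro s acc l0
    simp only [PySem.List.enumerate_cons, List.foldl_cons, Lf, lastF]
    rw [ih]
    simp

theorem rightFold (cs : List Char) :
    ∀ (s : Int) (rs : List Int), rs.length = cs.length →
    ((PySem.List.enumerate cs s).zip rs).foldr
      (fun p (st : Option Int × List Int) =>
        let nxt := if pvVowels.contains p.1.2 then some p.1.1 else st.1
        let v := match nxt with
          | none => p.2
          | some j => if j - p.1.1 < p.2 then j - p.1.1 else p.2
        (nxt, v :: st.2))
      (none, [])
    = (firstF cs s, combineF cs s rs) := by
  induction cs with
  | nil => intro s rs h; simp [firstF, combineF]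
  | cons c cs ih =>
    intro s rs h
    cases rs with
    | nil => simp at h
    | cons r rs =>
      simp only [PySem.List.enumerate_cons, List.zip_cons_cons, List.foldr_cons]
      rw [ih (s + 1) rs (by simpa using h)]
      simp only [combineF, firstF]

theorem vIdxS_append (s : Int) (l1 l2 : List Char) :
    vIdxS s (l1 ++ l2) = vIdxS s l1 ++ vIdxS (s + l1.length) l2 := by
  simp [vIdxS, PySem.List.enumerate_append]

theorem mem_vIdxS (s : Int) (cs : List Char) (x : Int) :
    x ∈ vIdxS s cs ↔ ∃ k : Nat, ∃ h : k < cs.length, x = s + k ∧ pvVowels.contains cs[k] := by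
  simp only [vIdxS, List.mem_map, List.mem_filter]
  constructor
  · rintro ⟨p, ⟨hp, hv⟩, rfl⟩
    obtain ⟨k, hk, rfl⟩ := (PySem.List.mem_enumerate_iff cs s p).1 hp
    exact ⟨k, hk, rfl, hv⟩
  · rintro ⟨k, hk, rfl, hv⟩
    exact ⟨(s + k, cs[k]), ⟨(PySem.List.mem_enumerate_iff cs s _).2 ⟨k, hk, rfl⟩, hv⟩, rfl⟩

theorem vIdxS_pairwise (s : Int) (cs : List Char) :
    (vIdxS s cs).Pairwise (· < ·) :=
  List.Pairwise.map _ (fun _ _ h => h)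
    ((PySem.List.pairwise_lt_enumerate cs s).filter _)

theorem vIdxS_ne_nil {cs : List Char} (h : cs.any (fun c => pvVowels.contains c) = true) :
    vIdxS 0 cs ≠ [] := by
  obtain ⟨x, hx, hv⟩ := List.any_eq_true.1 h
  obtain ⟨k, hk, rfl⟩ := List.mem_iff_getElem.1 hx
  intro hnil
  have : ((0 : Int) + k) ∈ vIdxS 0 cs := (mem_vIdxS 0 cs _).2 ⟨k, hk, rfl, hv⟩
  rw [hnil] at this; simp at this

theorem Lf_length (n : Nat) (cs : List Char) : ∀ (s : Int) (l0 : Option Int),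
    (Lf n cs s l0).length = cs.length := by
  induction cs with
  | nil => intro s l0; simp [Lf]
  | cons c cs ih => intro s l0; simp [Lf, ih]

theorem assemble (full : List Char) (hvow : full.any (fun c => pvVowels.contains c) = true) :
    ∀ (suf pre : List Char), pre ++ suf = full →
    combineF suf (pre.length) (Lf full.length suf (pre.length) (lastF pre 0 none))
      = (PySem.List.enumerate suf (pre.length : Int)).map
          (fun ic => dminD full.length (vIdxS 0 full) ic.1) := by
  intro suf
  induction suf with
  | nil => intro pre _; simp [combineF, PySem.List.enumerate_nil]
  | cons c suf ih =>
    intro pre hfull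
    have hl1 : (if pvVowels.contains c then some ((pre.length : Int)) else lastF pre 0 none)
        = lastF (pre ++ [c]) 0 none := by
      rw [lastF_append pre [c] 0 none]
      simp [lastF]
    simp only [Lf, combineF, PySem.List.enumerate_cons, List.map_cons]
    rw [hl1]
    refine List.cons_eq_cons.mpr ⟨?_, ?_⟩
    case refine_2 =>
      have := ih (pre ++ [c]) (by simpa using hfull)
      simpa [add_comm] using this
    case refine_1 =>
      -- head: apply core
      show combvF full.length (pre.length : Int) (lastF (pre ++ [c]) 0 none)
        (firstF (c :: suf) (pre.length : Int)) = _
      refine core (pre.length : Int) full.length (vIdxS 0 full)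
        (lastF (pre ++ [c]) 0 none) (firstF (c :: suf) (pre.length : Int))
        (by positivity) (vIdxS_ne_nil hvow) ?_ ?_ ?_ ?_
      · -- hprev_mem
        intro l hl
        rw [lastF_eq, Option.or_none] at hl
        have hmem := List.mem_of_getLast? hl
        constructor
        · have hV : vIdxS 0 full = vIdxS 0 (pre ++ [c]) ++ vIdxS ((0 : Int) + (pre ++ [c]).length) suf := by
            rw [← vIdxS_append]
            congr 1
            simpa using hfull.symm
          rw [hV]
          exact List.mem_append_left _ hmem
        · obtain ⟨k, hk, rfl, _⟩ := (mem_vIdxS _ _ _).1 hmem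
          simp at hk ⊢; omega
      · -- hprev_max
        intro x hx hxi
        have hV : vIdxS 0 full = vIdxS 0 (pre ++ [c]) ++ vIdxS ((0 : Int) + (pre ++ [c]).length) suf := by
          rw [← vIdxS_append]; congr 1; simpa using hfull.symm
        rw [hV] at hx
        rcases List.mem_append.1 hx with hxl | hxr
        · obtain ⟨m, hm, hxm⟩ := getLast?_max (vIdxS_pairwise 0 (pre ++ [c])) x hxl
          refine ⟨m, ?_, hxm⟩
          rw [lastF_eq, Option.or_none]; exact hm
        · exfalso
          obtain ⟨k, hk, rfl, _⟩ := (mem_vIdxS _ _ _).1 hxr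
          simp at hxi; omega
      · -- hnext_mem
        intro j hj
        rw [firstF_eq] at hj
        have hmem := List.mem_of_head? hj
        have hV : vIdxS 0 full = vIdxS 0 pre ++ vIdxS ((0 : Int) + pre.length) (c :: suf) := by
          rw [← vIdxS_append]; congr 1; exact hfull.symm
        obtain ⟨k, hk, rfl, _⟩ := (mem_vIdxS _ _ _).1 hmem
        refine ⟨?_, by omega, ?_⟩
        · rw [hV]
          apply List.mem_append_right
          have : ((0 : Int) + pre.length) = (pre.length : Int) := by simp
          rw [this]
          exact hmem
        · have hn : full.length = pre.length + (c :: suf).length := by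
            rw [← hfull]; simp
          simp at hk
          push_cast [hn]
          simp
          omega
      · -- hnext_min
        intro x hx hix
        have hV : vIdxS 0 full = vIdxS 0 pre ++ vIdxS ((0 : Int) + pre.length) (c :: suf) := by
          rw [← vIdxS_append]; congr 1; exact hfull.symm
        rw [hV] at hx
        rcases List.mem_append.1 hx with hxl | hxr
        · exfalso
          obtain ⟨k, hk, rfl, _⟩ := (mem_vIdxS _ _ _).1 hxl
          simp at hix; omega
        · have : ((0 : Int) + pre.length) = (pre.length : Int) := by simp
          rw [this] at hxr
          obtain ⟨m, hm, hmx⟩ := head?_min (vIdxS_pairwise _ (c :: suf)) hxr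
          exact ⟨m, by rw [firstF_eq]; exact hm, hmx⟩

theorem mem_vIdxS_zero {cs : List Char} {k : Nat} (hk : k < cs.length)
    (hv : pvVowels.contains cs[k]) : ((0 : Int) + k) ∈ vIdxS 0 cs :=
  (mem_vIdxS 0 cs _).2 ⟨k, hk, rfl, hv⟩

theorem A_eq_spec (txt : String) (hpre : Pre_distance_to_nearest_vowel txt) :
    distance_to_nearest_vowel txt
      = (PySem.List.enumerate txt.toList).map
          (fun ic => dminD txt.toList.length (vIdxS 0 txt.toList) ic.1) := by
  simp only [distance_to_nearest_vowel]
  set cs := txt.toList with hcs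
  split_ifs with hset
  · -- all characters equal, and by Pre_distance_to_nearest_vowel they are vowels
    obtain ⟨x, hx⟩ : ∃ x, (PySem.Set.ofList cs : List Char) = [x] := by
      rw [PySem.Set.len] at hset
      exact List.length_eq_one_iff.1 (by exact_mod_cast hset)
    have hallx : ∀ y ∈ cs, y = x := by
      intro y hy
      have := (PySem.Set.mem_ofList cs y).2 hy
      rw [hx] at this; simpa using this
    have hcsne : cs ≠ [] := by
      intro h; rw [h] at hx; simp [PySem.Set.ofList] at hx
    have hvx : pvVowels.contains x = true := by
      rcases hpre with h | h
      · exact absurd h hcsne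
      · obtain ⟨c0, hc0, hv0⟩ := List.any_eq_true.1 h
        rwa [hallx c0 hc0] at hv0
    symm
    rw [List.eq_replicate_iff]
    refine ⟨by simp [PySem.List.length_enumerate], ?_⟩
    intro b hb
    obtain ⟨ic, hic, rfl⟩ := List.mem_map.1 hb
    obtain ⟨k, hk, rfl⟩ := (PySem.List.mem_enumerate_iff cs 0 ic).1 hic
    exact dminD_eq_zero (mem_vIdxS_zero hk (by rw [hallx cs[k] (by simp)]; exact hvx))
  · -- general branch
    have hfun : (fun (dist : List Int) (ic : Int × Char) =>
        if pvVowels.contains ic.2 then dist ++ [(0 : Int)]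
        else
          let vowels := ((PySem.List.enumerate cs).filter (fun p => pvVowels.contains p.2)).map (·.1)
          let min_dist := (PySem.List.min? (vowels.map (fun x => |ic.1 - x|)) (fun y => y)).getD 0
          dist ++ [min_dist])
      = (fun dist ic => dist ++
          [if pvVowels.contains ic.2 then (0 : Int)
           else (PySem.List.min? ((vIdxS 0 cs).map (fun x => |ic.1 - x|)) (fun y => y)).getD 0]) := by
      funext dist ic
      split_ifs <;> rfl
    rw [hfun, PySem.List.foldl_append_singleton_eq_map, List.nil_append]
    apply List.map_congr_left
    intro ic hic
    obtain ⟨k, hk, rfl⟩ := (PySem.List.mem_enumerate_iff cs 0 ic).1 hic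
    by_cases hv : pvVowels.contains cs[k]
    · rw [if_pos hv]
      exact (dminD_eq_zero (mem_vIdxS_zero hk hv)).symm
    · rw [if_neg hv]
      have hcsne : cs ≠ [] := by intro h; rw [h] at hk; simp at hk
      have hvow : cs.any (fun c => pvVowels.contains c) = true := by
        rcases hpre with h | h
        · exact absurd h hcsne
        · exact h
      have hVne : (vIdxS 0 cs).map (fun x => |(0 : Int) + k - x|) ≠ [] := by
        simp only [ne_eq, List.map_eq_nil_iff]
        exact vIdxS_ne_nil hvow
      obtain ⟨m, hm⟩ := min?_of_ne_nil hVne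
      rw [hm, dminD, hm]
      rfl

theorem B_eq_spec (txt : String) (hpre : Pre_distance_to_nearest_vowel txt) :
    distance_to_nearest_vowel_alt txt
      = (PySem.List.enumerate txt.toList).map
          (fun ic => dminD txt.toList.length (vIdxS 0 txt.toList) ic.1) := by
  simp only [distance_to_nearest_vowel_alt]
  set cs := txt.toList with hcs
  rcases hpre with hnil | hvow
  · rw [hcs, hnil]
    simp [PySem.List.enumerate_nil]
  · have hguard : (cs.length != 0 && cs.all (fun c => !(pvVowels.contains c))) = false := by
      obtain ⟨c0, hc0, hv0⟩ := List.any_eq_true.1 hvow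
      have : cs.all (fun c => !(pvVowels.contains c)) = false := by
        rw [List.all_eq_false]
        exact ⟨c0, hc0, by rw [hv0]; decide⟩
      rw [this, Bool.and_false]
    rw [hguard]
    simp only [Bool.false_eq_true, if_false]
    rw [leftFold cs.length cs 0 [] none, List.nil_append]
    rw [rightFold cs 0 (Lf cs.length cs 0 none) (Lf_length cs.length cs 0 none)]
    have := assemble cs hvow cs [] rfl
    simpa using this

-- ===== VERDICT (by name: the statement is the Claim_ definition above) =====
theorem distance_to_nearest_vowel_spec : Claim_equal_distance_to_nearest_vowel := by
  intro txt _ hpre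
  unfold Spec_distance_to_nearest_vowel
  rw [A_eq_spec txt hpre, B_eq_spec txt hpre]
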